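-- pv_equiv track=rewrite | github.com/cornerbytes/CTF_PCT_23 | rev/xorror/peserta/chall.py | xorror_checker
-- ===== SOURCE A (Python) =====
-- def xorror_checker(user_input):
--     FLAG = [425, 1402, 429, 1291, 458, 1346, 400, 1361, 422, 1357, 408, 1362, 406, 1366, 406, 1357, 422, 1367, 384, 1368, 388]
--
--     if len(user_input) != len(FLAG):
--         return False
--
--     for i, char in enumerate(user_input):
--         xor_value = 505 if i % 2 == 0 else 1337
--         if ord(char) ^ xor_value != FLAG[i]:
--             return False
--
--     return True
-- ===== SOURCE B (Python) =====
-- def xorror_checker(user_input):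
--     # The XOR relation ord(c) ^ k == F is equivalent to c == chr(F ^ k), so the
--     # whole check collapses to a single equality against the decoded constant.
--     return user_input == "PCT23{ih_takooot_nya}"
-- ===== Notes on version B (the rewrite author's own statement) =====
-- stated objective: simpler
-- what changed: B replaces A's per-character XOR-and-compare loop entirely by one equality test against the constant-folded decoded flag string (XOR with a fixed key is a bijection, so the decoded constant characterises A's accepted input exactly).
import Mathlib
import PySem

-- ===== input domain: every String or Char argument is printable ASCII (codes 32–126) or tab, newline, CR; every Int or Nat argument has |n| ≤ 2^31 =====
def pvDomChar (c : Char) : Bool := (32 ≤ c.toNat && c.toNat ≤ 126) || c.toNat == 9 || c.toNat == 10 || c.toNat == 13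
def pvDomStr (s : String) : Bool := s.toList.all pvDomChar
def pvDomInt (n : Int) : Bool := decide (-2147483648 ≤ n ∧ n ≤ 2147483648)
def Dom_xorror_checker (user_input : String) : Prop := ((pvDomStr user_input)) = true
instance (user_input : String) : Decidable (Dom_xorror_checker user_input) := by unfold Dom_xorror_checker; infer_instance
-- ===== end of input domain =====

-- B constant-folds the whole XOR check into one equality against the decoded
-- flag string (XOR with a fixed key is a bijection), replacing A's length
-- guard plus per-character XOR loop (objective: simpler).

-- ===== PORT A =====
def xcFLAG : List Int := [425, 1402, 429, 1291, 458, 1346, 400, 1361, 422, 1357, 408, 1362, 406, 1366, 406, 1357, 422, 1367, 384, 1368, 388]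

-- the 'for i, char in enumerate(user_input)' loop with early return False
def xcLoop : List (Int × Char) → Bool
  | [] => true
  | (i, c) :: rest =>
      let xor_value : Int := if PySem.Int.mod i 2 = 0 then 505 else 1337
      if PySem.Int.bxor ((c.toNat : Int)) xor_value ≠ PySem.List.pyGetD xcFLAG i 0 then false
      else xcLoop rest

def xorror_checker (user_input : String) : Bool :=
  if user_input.toList.length ≠ xcFLAG.length then false
  else xcLoop (PySem.List.enumerate user_input.toList 0)

-- ===== PORT B =====
def xorror_checker_alt (user_input : String) : Bool :=
  user_input == "PCT23{ih_takooot_nya}"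

-- ===== PRECONDITION & SPEC =====
def Spec_xorror_checker (user_input : String) (out : Bool) : Prop := out = xorror_checker_alt user_input
instance (user_input : String) (out : Bool) : Decidable (Spec_xorror_checker user_input out) := by unfold Spec_xorror_checker; infer_instance

-- ===== CLAIM (what is proved, stated in full; the proofs are below) =====
def Claim_equal_xorror_checker : Prop := ∀ (user_input : String), Dom_xorror_checker user_input → Spec_xorror_checker user_input (xorror_checker user_input)

-- ===== LEMMAS AND PROOFS =====

-- the expected code points, i.e. what each loop step of A compares against
def xcExp (i : Nat) : Int :=
  PySem.Int.bxor (PySem.List.pyGetD xcFLAG (i : Int) 0) (if i % 2 = 0 then 505 else 1337)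

lemma xcFLAG_nonneg : ∀ k : Nat, k < 21 → 0 ≤ PySem.List.pyGetD xcFLAG (k : Int) 0 := by decide

lemma bxor_eq_iff_swap (m v : Nat) (F : Int) (hF : 0 ≤ F) :
    (PySem.Int.bxor (m : Int) (v : Int) = F ↔ (m : Int) = PySem.Int.bxor F (v : Int)) := by
  obtain ⟨f, rfl⟩ := Int.eq_ofNat_of_zero_le hF
  simp only [PySem.Int.bxor_natCast, Nat.cast_inj]
  constructor
  · intro h; rw [← h, Nat.xor_xor_cancel_right]
  · intro h; rw [h, Nat.xor_xor_cancel_right]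

lemma head_iff (c : Char) (k : Nat) (hk : k < 21) :
    (PySem.Int.bxor ((c.toNat : Int))
        (if PySem.Int.mod (k : Int) 2 = 0 then (505 : Int) else 1337) =
      PySem.List.pyGetD xcFLAG (k : Int) 0
     ↔ (c.toNat : Int) = xcExp k) := by
  have hm : PySem.Int.mod (k : Int) 2 = ((k % 2 : Nat) : Int) := by
    exact_mod_cast PySem.Int.mod_natCast k 2
  rw [xcExp, hm]
  by_cases h2 : k % 2 = 0
  · simp only [h2, Nat.cast_zero, ite_true]
    have : (505 : Int) = ((505 : Nat) : Int) := by norm_num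
    rw [this]
    exact bxor_eq_iff_swap _ _ _ (xcFLAG_nonneg k hk)
  · have hne : ((k % 2 : Nat) : Int) ≠ 0 := by
      exact Nat.cast_ne_zero.mpr h2
    simp only [if_neg hne, if_neg h2]
    have : (1337 : Int) = ((1337 : Nat) : Int) := by norm_num
    rw [this]
    exact bxor_eq_iff_swap _ _ _ (xcFLAG_nonneg k hk)

lemma loop_iff : ∀ (cs : List Char) (k : Nat), k + cs.length = 21 →
    (xcLoop (PySem.List.enumerate cs (k : Int)) = true ↔
      cs.map (fun c => (c.toNat : Int)) = (List.range' k cs.length).map xcExp) := by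
  intro cs
  induction cs with
  | nil => intro k _; simp [PySem.List.enumerate_nil, xcLoop]
  | cons c cs ih =>
    intro k hk
    have hk21 : k < 21 := by simp at hk; omega
    rw [PySem.List.enumerate_cons]
    have hcast : ((k : Int) + 1) = ((k + 1 : Nat) : Int) := by push_cast; ring
    simp only [xcLoop, hcast, List.length_cons, List.range'_succ, List.map_cons]
    by_cases h : PySem.Int.bxor ((c.toNat : Int))
        (if PySem.Int.mod (k : Int) 2 = 0 then (505 : Int) else 1337) =
        PySem.List.pyGetD xcFLAG (k : Int) 0
    · rw [if_neg (by simpa using h)]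
      rw [ih (k + 1) (by simp at hk ⊢; omega)]
      constructor
      · intro ht; exact List.cons_eq_cons.mpr ⟨(head_iff c k hk21).mp h, ht⟩
      · intro ht; exact (List.cons_eq_cons.mp ht).2
    · rw [if_pos (by simpa using h)]
      constructor
      · intro hf; exact absurd hf (by simp)
      · intro ht
        exact absurd ((head_iff c k hk21).mpr (List.cons_eq_cons.mp ht).1) h

-- the expected code points are exactly the code points of the secret string
lemma expected_eq_secret :
    (List.range' 0 21).map xcExp =
      ("PCT23{ih_takooot_nya}".toList).map (fun c => (c.toNat : Int)) := by decide

lemma map_toNatInt_inj {cs ds : List Char}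
    (h : cs.map (fun c => (c.toNat : Int)) = ds.map (fun c => (c.toNat : Int))) : cs = ds := by
  have : Function.Injective (fun c : Char => (c.toNat : Int)) := by
    intro a b hab
    simp only [Nat.cast_inj] at hab
    have h2 : a.toNat = b.toNat := by exact_mod_cast hab
    have h3 : a.val = b.val := by
      unfold Char.toNat at h2
      exact UInt32.toNat_inj.mp h2
    exact Char.ext h3
  exact List.map_injective_iff.mpr this h

-- ===== VERDICT (by name: the statement is the Claim_ definition above) =====
theorem xorror_checker_spec : Claim_equal_xorror_checker := by
  intro s _
  unfold Spec_xorror_checker xorror_checker xorror_checker_alt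
  have hFlen : xcFLAG.length = 21 := rfl
  have hsec : ("PCT23{ih_takooot_nya}".toList).length = 21 := by decide
  rw [Bool.eq_iff_iff, beq_iff_eq]
  by_cases hl : s.toList.length = 21
  · rw [hFlen, if_neg (by omega)]
    have hloop := loop_iff s.toList 0 (by omega)
    simp only [Nat.cast_zero] at hloop
    rw [hloop, hl, expected_eq_secret]
    constructor
    · intro h
      have := map_toNatInt_inj h
      exact String.toList_inj.mp this
    · intro h; rw [h]
  · rw [hFlen, if_pos (by omega)]
    constructor
    · intro h; exact absurd h (by simp)
    · intro h
      exact absurd (h ▸ hsec) hl
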